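-- pv_equiv track=rewrite | github.com/allevitan/wh2music | app/music.py | guess_album_and_artist
-- ===== SOURCE A (Python) =====
-- def guess_album_and_artist(metadatas):
--     """
--     Get the most common album and artist from a list of
--     possibly incomplete metadata objects."""
--     albums, artists = {}, {}
--     for metadata in metadatas:
--         album = metadata.get('album','')
--         artist = metadata.get('artist','')
--         albums[album] = albums.get(album, 0) + 1
--         artists[artist] = artists.get(artist, 0) + 1
--     if albums: album = max(albums)
--     else: album = ''
--     if artists: artist = max(artists)
--     else: artist = ''
--     return album, artist
-- ===== SOURCE B (Python) =====
-- def guess_album_and_artist(metadatas):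
--     """
--     Get the most common album and artist from a list of
--     possibly incomplete metadata objects."""
--     album_max = None
--     artist_max = None
--     for metadata in metadatas:
--         album = metadata.get('album', '')
--         artist = metadata.get('artist', '')
--         if album_max is None or album > album_max:
--             album_max = album
--         if artist_max is None or artist > artist_max:
--             artist_max = artist
--     return (album_max if album_max is not None else '',
--             artist_max if artist_max is not None else '')
-- ===== Notes on version B (the rewrite author's own statement) =====
-- stated objective: simpler
-- what changed: Replaced the two count dictionaries (whose counts A never uses) plus max-over-keys with a single pass keeping two running-maximum strings.
import Mathlib
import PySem

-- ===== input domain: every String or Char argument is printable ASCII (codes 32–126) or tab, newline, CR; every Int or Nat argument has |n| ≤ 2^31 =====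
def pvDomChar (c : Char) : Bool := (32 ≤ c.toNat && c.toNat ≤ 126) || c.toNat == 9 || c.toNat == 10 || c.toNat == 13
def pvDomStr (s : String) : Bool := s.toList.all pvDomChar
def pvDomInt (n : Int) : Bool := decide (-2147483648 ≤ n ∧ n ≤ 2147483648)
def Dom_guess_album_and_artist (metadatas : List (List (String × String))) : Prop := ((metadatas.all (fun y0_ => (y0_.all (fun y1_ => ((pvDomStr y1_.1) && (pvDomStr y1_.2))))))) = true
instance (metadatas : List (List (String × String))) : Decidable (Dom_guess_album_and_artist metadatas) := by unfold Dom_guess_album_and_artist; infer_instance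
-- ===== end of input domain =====

-- B replaces A's unused count dictionaries with a single pass keeping two running-maximum strings (simpler, O(1) extra space).


-- ===== PORT A =====
-- A: build count dicts for album and artist, then take max over the keys.
def guess_album_and_artist (metadatas : List (List (String × String))) : String × String :=
  let p := metadatas.foldl
    (fun (p : PySem.Dict String Int × PySem.Dict String Int) metadata =>
      let album := (PySem.Dict.mk metadata).getD "album" ""
      let artist := (PySem.Dict.mk metadata).getD "artist" ""
      (p.1.insert album (p.1.getD album 0 + 1), p.2.insert artist (p.2.getD artist 0 + 1)))
    (PySem.Dict.empty, PySem.Dict.empty)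
  let album := match PySem.List.max? p.1.keys (fun x => x) with
    | some m => m
    | none => ""
  let artist := match PySem.List.max? p.2.keys (fun x => x) with
    | some m => m
    | none => ""
  (album, artist)

-- ===== PORT B =====
-- B: one pass keeping two running-maximum strings (Option String accumulators).
def guess_album_and_artist_alt (metadatas : List (List (String × String))) : String × String :=
  let p := metadatas.foldl
    (fun (p : Option String × Option String) metadata =>
      let album := (PySem.Dict.mk metadata).getD "album" ""
      let artist := (PySem.Dict.mk metadata).getD "artist" ""
      ((match p.1 with
        | none => some album
        | some c => if c < album then some album else some c),
       (match p.2 with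
        | none => some artist
        | some c => if c < artist then some artist else some c)))
    (none, none)
  ((p.1).getD "", (p.2).getD "")

-- ===== PRECONDITION & SPEC =====
def Spec_guess_album_and_artist (metadatas : List (List (String × String))) (out : String × String) : Prop := out = guess_album_and_artist_alt metadatas
instance (metadatas : List (List (String × String))) (out : String × String) : Decidable (Spec_guess_album_and_artist metadatas out) := by unfold Spec_guess_album_and_artist; infer_instance

-- ===== CLAIM (what is proved, stated in full; the proofs are below) =====
def Claim_equal_guess_album_and_artist : Prop := ∀ (metadatas : List (List (String × String))), Dom_guess_album_and_artist metadatas → Spec_guess_album_and_artist metadatas (guess_album_and_artist metadatas)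

-- ===== LEMMAS AND PROOFS =====

-- the two fields the loops read from each metadata dict
def pvAlbum (m : List (String × String)) : String := (PySem.Dict.mk m).getD "album" ""
def pvArtist (m : List (String × String)) : String := (PySem.Dict.mk m).getD "artist" ""

-- A's pair fold splits into two independent counting folds
theorem pv_fold_A (l : List (List (String × String)))
    (d1 d2 : PySem.Dict String Int) :
    l.foldl (fun p metadata =>
      let album := (PySem.Dict.mk metadata).getD "album" ""
      let artist := (PySem.Dict.mk metadata).getD "artist" ""
      (p.1.insert album (p.1.getD album 0 + 1), p.2.insert artist (p.2.getD artist 0 + 1)))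
      (d1, d2)
    = (l.foldl (fun d m => d.insert (pvAlbum m) (d.getD (pvAlbum m) 0 + 1)) d1,
       l.foldl (fun d m => d.insert (pvArtist m) (d.getD (pvArtist m) 0 + 1)) d2) := by
  induction l generalizing d1 d2 with
  | nil => rfl
  | cons x t ih => simpa [List.foldl, pvAlbum, pvArtist] using ih _ _

-- B's pair fold splits into two independent running-max folds
theorem pv_fold_B (l : List (List (String × String)))
    (a b : Option String) :
    l.foldl (fun p metadata =>
      let album := (PySem.Dict.mk metadata).getD "album" ""
      let artist := (PySem.Dict.mk metadata).getD "artist" ""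
      ((match p.1 with
        | none => some album
        | some c => if c < album then some album else some c),
       (match p.2 with
        | none => some artist
        | some c => if c < artist then some artist else some c)))
      (a, b)
    = (l.foldl (fun acc m => match acc with
        | none => some (pvAlbum m)
        | some c => if c < pvAlbum m then some (pvAlbum m) else some c) a,
       l.foldl (fun acc m => match acc with
        | none => some (pvArtist m)
        | some c => if c < pvArtist m then some (pvArtist m) else some c) b) := by
  induction l generalizing a b with
  | nil => rfl
  | cons x t ih => simpa [List.foldl, pvAlbum, pvArtist] using ih _ _

-- a running max over an already-started accumulator is a plain foldl max
theorem pv_run_some (l : List String) (a : String) :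
    l.foldl (fun acc v => match acc with
      | none => some v
      | some c => if c < v then some v else some c) (some a)
    = some (l.foldl max a) := by
  induction l generalizing a with
  | nil => rfl
  | cons x t ih =>
    simp only [List.foldl]
    rcases lt_or_ge a x with h | h
    · rw [if_pos h, ih, max_eq_right h.le]
    · rw [if_neg (not_lt.mpr h), ih, max_eq_left h]

-- the running max IS Python max() (first extremal = the maximum string)
theorem pv_run_eq_max? (l : List String) :
    l.foldl (fun acc v => match acc with
      | none => some v
      | some c => if c < v then some v else some c) none
    = PySem.List.max? l (fun x => x) := by
  cases l with
  | nil => rfl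
  | cons x t =>
    simp only [List.foldl]
    rw [pv_run_some, PySem.List.max?_id_cons]

-- max? with key id is determined by being an upper bound that is attained
theorem pv_max?_unique (l : List String) (m : String)
    (hm : m ∈ l) (hmax : ∀ y ∈ l, y ≤ m) :
    PySem.List.max? l (fun x => x) = some m := by
  cases h : PySem.List.max? l (fun x => x) with
  | none =>
    rw [PySem.List.max?_eq_none_iff] at h
    subst h; cases hm
  | some m' =>
    have h1 := PySem.List.max?_mem h
    have h2 := PySem.List.max?_isMax h m hm
    have h3 := hmax m' h1
    exact congrArg some (le_antisymm h3 h2)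

-- max over the distinct values equals max over all values
theorem pv_max?_ofList (l : List String) :
    PySem.List.max? (PySem.Set.ofList l) (fun x => x)
    = PySem.List.max? l (fun x => x) := by
  cases h : PySem.List.max? l (fun x => x) with
  | none =>
    rw [PySem.List.max?_eq_none_iff] at h
    subst h; rfl
  | some m =>
    apply pv_max?_unique
    · exact (PySem.Set.mem_ofList _ _).2 (PySem.List.max?_mem h)
    · intro y hy
      exact PySem.List.max?_isMax h y ((PySem.Set.mem_ofList _ _).1 hy)

-- one side (album or artist): A's count-dict-then-max equals B's running max
theorem pv_side (key : List (String × String) → String)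
    (l : List (List (String × String))) :
    (match PySem.List.max?
        (l.foldl (fun d m => d.insert (key m) (d.getD (key m) 0 + 1))
          (PySem.Dict.empty : PySem.Dict String Int)).keys (fun x => x) with
      | some m => m
      | none => "")
    = (l.foldl (fun acc m => match acc with
        | none => some (key m)
        | some c => if c < key m then some (key m) else some c) none).getD "" := by
  have hk : (l.foldl (fun d m => d.insert (key m) (d.getD (key m) 0 + 1))
      (PySem.Dict.empty : PySem.Dict String Int)).keys
      = PySem.Set.ofList (l.map key) := by
    rw [PySem.Dict.keys_foldl_insert_key]
    rfl
  have hb : l.foldl (fun acc m => match acc with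
        | none => some (key m)
        | some c => if c < key m then some (key m) else some c) none
      = PySem.List.max? (l.map key) (fun x => x) := by
    rw [← pv_run_eq_max?, List.foldl_map]
  rw [hk, pv_max?_ofList, hb]
  cases PySem.List.max? (l.map key) (fun x => x) <;> rfl

-- ===== VERDICT (by name: the statement is the Claim_ definition above) =====
theorem guess_album_and_artist_spec : Claim_equal_guess_album_and_artist := by
  intro metadatas _
  show guess_album_and_artist metadatas = guess_album_and_artist_alt metadatas
  unfold guess_album_and_artist guess_album_and_artist_alt
  rw [pv_fold_A, pv_fold_B]
  exact Prod.ext (pv_side pvAlbum metadatas) (pv_side pvArtist metadatas)
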